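-- pv_equiv track=rewrite | github.com/jinnnii/coding-test-py | KEJ/week4/팩토리얼.py | solution
-- ===== SOURCE A (Python) =====
-- def solution(n):
--     fac = 1
--     for i,v in enumerate(range(1,11)):
--         fac*=v
--         if fac>n:
--             return i
--         elif fac==n:
--             return i+1
-- ===== SOURCE B (Python) =====
-- # Binary search over a precomputed factorial table instead of A's incremental scan.
-- _F = [1, 2, 6, 24, 120, 720, 5040, 40320, 362880, 3628800]  # (i+1)! for i=0..9
--
-- def solution(n):
--     lo, hi = 0, len(_F)
--     while lo < hi:  # bisect_left by hand (A imports nothing, so no bisect module)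
--         mid = (lo + hi) // 2
--         if _F[mid] < n:
--             lo = mid + 1
--         else:
--             hi = mid
--     if lo < len(_F):
--         return lo + 1 if _F[lo] == n else lo
--     return None
-- ===== Notes on version B (the rewrite author's own statement) =====
-- stated objective: alternative
-- what changed: Replaced A's incremental factorial-accumulating linear scan with a precomputed factorial table searched by a hand-written binary search (bisect_left), deciding the equal/greater case from the insertion point.
-- outside the precondition, e.g. on solution(3628801): A returns None, B returns None
import Mathlib
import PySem

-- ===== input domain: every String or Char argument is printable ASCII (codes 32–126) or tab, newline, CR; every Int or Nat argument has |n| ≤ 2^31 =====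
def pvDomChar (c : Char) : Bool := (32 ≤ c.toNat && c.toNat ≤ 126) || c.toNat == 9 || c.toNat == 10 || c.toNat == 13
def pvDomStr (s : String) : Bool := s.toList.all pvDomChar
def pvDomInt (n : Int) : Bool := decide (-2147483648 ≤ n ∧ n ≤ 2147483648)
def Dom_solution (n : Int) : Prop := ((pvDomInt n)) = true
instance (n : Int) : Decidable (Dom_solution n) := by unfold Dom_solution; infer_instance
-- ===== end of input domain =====

-- B replaces A's incremental factorial scan with a precomputed table + binary search; same return value for all n ≤ 10!.

-- ===== PORT A =====
-- A's loop over enumerate(range(1,11)): recursion over the (index, value) pairs with the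
-- running factorial as accumulator; `none` = Python's fall-through `return None`.
def solutionLoopA (n : Int) (fac : Int) : List (Int × Int) → Option Int
  | [] => none
  | (i, v) :: rest =>
    let fac' := fac * v
    if fac' > n then some i
    else if fac' = n then some (i + 1)
    else solutionLoopA n fac' rest

def solution (n : Int) : Int :=
  (solutionLoopA n 1 (PySem.List.enumerate (PySem.List.pyRange 1 11 1))).getD 0
  -- `.getD 0` only covers the `None` case (n > 10!), which Pre_solution excludes

-- ===== PORT B =====
def pvFacTable : List Int := [1, 2, 6, 24, 120, 720, 5040, 40320, 362880, 3628800]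

-- Source B's while-loop: lo and hi stay in 0..10, so Nat indices and Nat `/ 2` match Python's `//`;
-- the fuel argument (= initial hi - lo) only makes the loop structurally total.
def bisectLoop (n : Int) : Nat → Nat → Nat → Nat
  | 0, lo, _ => lo
  | fuel + 1, lo, hi =>
    if lo < hi then
      let mid := (lo + hi) / 2
      if pvFacTable.getD mid 0 < n then bisectLoop n fuel (mid + 1) hi
      else bisectLoop n fuel lo mid
    else lo

def solution_alt (n : Int) : Int :=
  let lo := bisectLoop n pvFacTable.length 0 pvFacTable.length
  if lo < pvFacTable.length then
    if pvFacTable.getD lo 0 = n then (lo : Int) + 1 else (lo : Int)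
  else 0
  -- the `else 0` covers Source B's `return None` (n > 10!), excluded by Pre_solution

-- ===== PRECONDITION & SPEC =====
-- Pre_ excludes n > 10! = 3628800, where Python A (and B) return None instead of an int.
def Pre_solution (n : Int) : Prop := n ≤ 3628800
instance (n : Int) : Decidable (Pre_solution n) := by unfold Pre_solution; infer_instance
def pvWitness_solution : Int := 7

def Spec_solution (n : Int) (out : Int) : Prop := out = solution_alt n
instance (n : Int) (out : Int) : Decidable (Spec_solution n out) := by unfold Spec_solution; infer_instance

-- ===== CLAIM (what is proved, stated in full; the proofs are below) =====
def Claim_equal_solution : Prop := ∀ (n : Int), Dom_solution n → Pre_solution n → Spec_solution n (solution n)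

-- ===== LEMMAS AND PROOFS =====

-- ===== VERDICT (by name: the statement is the Claim_ definition above) =====
set_option maxHeartbeats 1000000 in
theorem solution_spec : Claim_equal_solution := by
  intro n _ hp
  unfold Pre_solution at hp
  unfold Spec_solution
  have hEnum : PySem.List.enumerate (PySem.List.pyRange 1 11 1) =
      [(0,1),(1,2),(2,3),(3,4),(4,5),(5,6),(6,7),(7,8),(8,9),(9,10)] := by decide
  by_cases h0 : n < 1
  · unfold solution solution_alt
    rw [hEnum]
    simp [solutionLoopA, bisectLoop, pvFacTable, apply_ite (fun o : Option Int => o.getD 0)]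
    norm_num [eq_false (by omega : ¬(1 < n)), eq_true (by omega : n < 1), eq_false (by omega : ¬(1 = n)), eq_false (by omega : ¬(n = 1)), eq_false (by omega : ¬(2 < n)), eq_true (by omega : n < 2), eq_false (by omega : ¬(2 = n)), eq_false (by omega : ¬(n = 2)), eq_false (by omega : ¬(6 < n)), eq_true (by omega : n < 6), eq_false (by omega : ¬(6 = n)), eq_false (by omega : ¬(n = 6)), eq_false (by omega : ¬(24 < n)), eq_true (by omega : n < 24), eq_false (by omega : ¬(24 = n)), eq_false (by omega : ¬(n = 24)), eq_false (by omega : ¬(120 < n)), eq_true (by omega : n < 120), eq_false (by omega : ¬(120 = n)), eq_false (by omega : ¬(n = 120)), eq_false (by omega : ¬(720 < n)), eq_true (by omega : n < 720), eq_false (by omega : ¬(720 = n)), eq_false (by omega : ¬(n = 720)), eq_false (by omega : ¬(5040 < n)), eq_true (by omega : n < 5040), eq_false (by omega : ¬(5040 = n)), eq_false (by omega : ¬(n = 5040)), eq_false (by omega : ¬(40320 < n)), eq_true (by omega : n < 40320), eq_false (by omega : ¬(40320 = n)), eq_false (by omega : ¬(n = 40320)), eq_false (by omega : ¬(362880 <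 n)), eq_true (by omega : n < 362880), eq_false (by omega : ¬(362880 = n)), eq_false (by omega : ¬(n = 362880)), eq_false (by omega : ¬(3628800 < n)), eq_true (by omega : n < 3628800), eq_false (by omega : ¬(3628800 = n)), eq_false (by omega : ¬(n = 3628800))]
  by_cases e0 : n = 1
  · subst e0; decide
  by_cases e1 : n = 2
  · subst e1; decide
  by_cases g1 : n < 6
  · unfold solution solution_alt
    rw [hEnum]
    simp [solutionLoopA, bisectLoop, pvFacTable, apply_ite (fun o : Option Int => o.getD 0)]
    norm_num [eq_true (by omega : 1 < n), eq_false (by omega : ¬(n < 1)), eq_false (by omega : ¬(1 = n)), eq_false (by omega : ¬(n = 1)), eq_false (by omega : ¬(n ≤ 1)), eq_true (by omega : 1 ≤ n), eq_true (by omega : 2 < n), eq_false (by omega : ¬(n < 2)), eq_false (by omega : ¬(2 = n)), eq_false (by omega : ¬(n = 2)), eq_false (by omega : ¬(n ≤ 2)), eq_true (by omega : 2 ≤ n), eq_false (by omega : ¬(6 < n)), eq_true (by omega : n < 6), eq_false (by omega : ¬(6 = n)), eq_false (by omega : ¬(n = 6)), eq_false (by omega : ¬(24 < n)), eq_true (by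 omega : n < 24), eq_false (by omega : ¬(24 = n)), eq_false (by omega : ¬(n = 24)), eq_false (by omega : ¬(120 < n)), eq_true (by omega : n < 120), eq_false (by omega : ¬(120 = n)), eq_false (by omega : ¬(n = 120)), eq_false (by omega : ¬(720 < n)), eq_true (by omega : n < 720), eq_false (by omega : ¬(720 = n)), eq_false (by omega : ¬(n = 720)), eq_false (by omega : ¬(5040 < n)), eq_true (by omega : n < 5040), eq_false (by omega : ¬(5040 = n)), eq_false (by omega : ¬(n = 5040)), eq_false (by omega : ¬(40320 < n)), eq_true (by omega : n < 40320), eq_false (by omega : ¬(40320 = n)), eq_false (by omega : ¬(n = 40320)), eq_false (by omega : ¬(362880 < n)), eq_true (by omega : n < 362880), eq_false (by omega : ¬(362880 = n)), eq_false (by omega : ¬(n = 362880)), eq_false (by omega : ¬(3628800 < n)), eq_true (by omega : n < 3628800), eq_false (by omega : ¬(3628800 = n)), eq_false (by omega : ¬(n = 3628800))]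
  by_cases e2 : n = 6
  · subst e2; decide
  by_cases g2 : n < 24
  · unfold solution solution_alt
    rw [hEnum]
    simp [solutionLoopA, bisectLoop, pvFacTable, apply_ite (fun o : Option Int => o.getD 0)]
    norm_num [eq_true (by omega : 1 < n), eq_false (by omega : ¬(n < 1)), eq_false (by omega : ¬(1 = n)), eq_false (by omega : ¬(n = 1)), eq_false (by omega : ¬(n ≤ 1)), eq_true (by omega : 1 ≤ n), eq_true (by omega : 2 < n), eq_false (by omega : ¬(n < 2)), eq_false (by omega : ¬(2 = n)), eq_false (by omega : ¬(n = 2)), eq_false (by omega : ¬(n ≤ 2)), eq_true (by omega : 2 ≤ n), eq_true (by omega : 6 < n), eq_false (by omega : ¬(n < 6)), eq_false (by omega : ¬(6 = n)), eq_false (by omega : ¬(n = 6)), eq_false (by omega : ¬(n ≤ 6)), eq_true (by omega : 6 ≤ n), eq_false (by omega : ¬(24 < n)), eq_true (by omega : n < 24), eq_false (by omega : ¬(24 = n)), eq_false (by omega : ¬(n = 24)), eq_false (by omega : ¬(120 < n)), eq_true (by omega : n < 120), eq_false (by omega : ¬(120 = n)), eq_false (by omega : ¬(n = 120)), eq_false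 (by omega : ¬(720 < n)), eq_true (by omega : n < 720), eq_false (by omega : ¬(720 = n)), eq_false (by omega : ¬(n = 720)), eq_false (by omega : ¬(5040 < n)), eq_true (by omega : n < 5040), eq_false (by omega : ¬(5040 = n)), eq_false (by omega : ¬(n = 5040)), eq_false (by omega : ¬(40320 < n)), eq_true (by omega : n < 40320), eq_false (by omega : ¬(40320 = n)), eq_false (by omega : ¬(n = 40320)), eq_false (by omega : ¬(362880 < n)), eq_true (by omega : n < 362880), eq_false (by omega : ¬(362880 = n)), eq_false (by omega : ¬(n = 362880)), eq_false (by omega : ¬(3628800 < n)), eq_true (by omega : n < 3628800), eq_false (by omega : ¬(3628800 = n)), eq_false (by omega : ¬(n = 3628800))]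
  by_cases e3 : n = 24
  · subst e3; decide
  by_cases g3 : n < 120
  · unfold solution solution_alt
    rw [hEnum]
    simp [solutionLoopA, bisectLoop, pvFacTable, apply_ite (fun o : Option Int => o.getD 0)]
    norm_num [eq_true (by omega : 1 < n), eq_false (by omega : ¬(n < 1)), eq_false (by omega : ¬(1 = n)), eq_false (by omega : ¬(n = 1)), eq_false (by omega : ¬(n ≤ 1)), eq_true (by omega : 1 ≤ n), eq_true (by omega : 2 < n), eq_false (by omega : ¬(n < 2)), eq_false (by omega : ¬(2 = n)), eq_false (by omega : ¬(n = 2)), eq_false (by omega : ¬(n ≤ 2)), eq_true (by omega : 2 ≤ n), eq_true (by omega : 6 < n), eq_false (by omega : ¬(n < 6)), eq_false (by omega : ¬(6 = n)), eq_false (by omega : ¬(n = 6)), eq_false (by omega : ¬(n ≤ 6)), eq_true (by omega : 6 ≤ n), eq_true (by omega : 24 < n), eq_false (by omega : ¬(n < 24)), eq_false (by omega : ¬(24 = n)), eq_false (by omega : ¬(n = 24)), eq_false (by omega : ¬(n ≤ 24)), eq_true (by omega : 24 ≤ n), eq_false (by omega : ¬(120 < n)), eq_true (by omega : n < 120), eq_false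 (by omega : ¬(120 = n)), eq_false (by omega : ¬(n = 120)), eq_false (by omega : ¬(720 < n)), eq_true (by omega : n < 720), eq_false (by omega : ¬(720 = n)), eq_false (by omega : ¬(n = 720)), eq_false (by omega : ¬(5040 < n)), eq_true (by omega : n < 5040), eq_false (by omega : ¬(5040 = n)), eq_false (by omega : ¬(n = 5040)), eq_false (by omega : ¬(40320 < n)), eq_true (by omega : n < 40320), eq_false (by omega : ¬(40320 = n)), eq_false (by omega : ¬(n = 40320)), eq_false (by omega : ¬(362880 < n)), eq_true (by omega : n < 362880), eq_false (by omega : ¬(362880 = n)), eq_false (by omega : ¬(n = 362880)), eq_false (by omega : ¬(3628800 < n)), eq_true (by omega : n < 3628800), eq_false (by omega : ¬(3628800 = n)), eq_false (by omega : ¬(n = 3628800))]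
  by_cases e4 : n = 120
  · subst e4; decide
  by_cases g4 : n < 720
  · unfold solution solution_alt
    rw [hEnum]
    simp [solutionLoopA, bisectLoop, pvFacTable, apply_ite (fun o : Option Int => o.getD 0)]
    norm_num [eq_true (by omega : 1 < n), eq_false (by omega : ¬(n < 1)), eq_false (by omega : ¬(1 = n)), eq_false (by omega : ¬(n = 1)), eq_false (by omega : ¬(n ≤ 1)), eq_true (by omega : 1 ≤ n), eq_true (by omega : 2 < n), eq_false (by omega : ¬(n < 2)), eq_false (by omega : ¬(2 = n)), eq_false (by omega : ¬(n = 2)), eq_false (by omega : ¬(n ≤ 2)), eq_true (by omega : 2 ≤ n), eq_true (by omega : 6 < n), eq_false (by omega : ¬(n < 6)), eq_false (by omega : ¬(6 = n)), eq_false (by omega : ¬(n = 6)), eq_false (by omega : ¬(n ≤ 6)), eq_true (by omega : 6 ≤ n), eq_true (by omega : 24 < n), eq_false (by omega : ¬(n < 24)), eq_false (by omega : ¬(24 = n)), eq_false (by omega : ¬(n = 24)), eq_false (by omega : ¬(n ≤ 24)), eq_true (by omega : 24 ≤ n), eq_true (by omega : 120 < n), eq_false (by omega : ¬(n < 120)),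 eq_false (by omega : ¬(120 = n)), eq_false (by omega : ¬(n = 120)), eq_false (by omega : ¬(n ≤ 120)), eq_true (by omega : 120 ≤ n), eq_false (by omega : ¬(720 < n)), eq_true (by omega : n < 720), eq_false (by omega : ¬(720 = n)), eq_false (by omega : ¬(n = 720)), eq_false (by omega : ¬(5040 < n)), eq_true (by omega : n < 5040), eq_false (by omega : ¬(5040 = n)), eq_false (by omega : ¬(n = 5040)), eq_false (by omega : ¬(40320 < n)), eq_true (by omega : n < 40320), eq_false (by omega : ¬(40320 = n)), eq_false (by omega : ¬(n = 40320)), eq_false (by omega : ¬(362880 < n)), eq_true (by omega : n < 362880), eq_false (by omega : ¬(362880 = n)), eq_false (by omega : ¬(n = 362880)), eq_false (by omega : ¬(3628800 < n)), eq_true (by omega : n < 3628800), eq_false (by omega : ¬(3628800 = n)), eq_false (by omega : ¬(n = 3628800))]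
  by_cases e5 : n = 720
  · subst e5; decide
  by_cases g5 : n < 5040
  · unfold solution solution_alt
    rw [hEnum]
    simp [solutionLoopA, bisectLoop, pvFacTable, apply_ite (fun o : Option Int => o.getD 0)]
    norm_num [eq_true (by omega : 1 < n), eq_false (by omega : ¬(n < 1)), eq_false (by omega : ¬(1 = n)), eq_false (by omega : ¬(n = 1)), eq_false (by omega : ¬(n ≤ 1)), eq_true (by omega : 1 ≤ n), eq_true (by omega : 2 < n), eq_false (by omega : ¬(n < 2)), eq_false (by omega : ¬(2 = n)), eq_false (by omega : ¬(n = 2)), eq_false (by omega : ¬(n ≤ 2)), eq_true (by omega : 2 ≤ n), eq_true (by omega : 6 < n), eq_false (by omega : ¬(n < 6)), eq_false (by omega : ¬(6 = n)), eq_false (by omega : ¬(n = 6)), eq_false (by omega : ¬(n ≤ 6)), eq_true (by omega : 6 ≤ n), eq_true (by omega : 24 < n), eq_false (by omega : ¬(n < 24)), eq_false (by omega : ¬(24 = n)), eq_false (by omega : ¬(n = 24)), eq_false (by omega : ¬(n ≤ 24)), eq_true (by omega : 24 ≤ n), eq_true (by omega : 120 < n), eq_false (by omega : ¬(n < 120)),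 eq_false (by omega : ¬(120 = n)), eq_false (by omega : ¬(n = 120)), eq_false (by omega : ¬(n ≤ 120)), eq_true (by omega : 120 ≤ n), eq_true (by omega : 720 < n), eq_false (by omega : ¬(n < 720)), eq_false (by omega : ¬(720 = n)), eq_false (by omega : ¬(n = 720)), eq_false (by omega : ¬(n ≤ 720)), eq_true (by omega : 720 ≤ n), eq_false (by omega : ¬(5040 < n)), eq_true (by omega : n < 5040), eq_false (by omega : ¬(5040 = n)), eq_false (by omega : ¬(n = 5040)), eq_false (by omega : ¬(40320 < n)), eq_true (by omega : n < 40320), eq_false (by omega : ¬(40320 = n)), eq_false (by omega : ¬(n = 40320)), eq_false (by omega : ¬(362880 < n)), eq_true (by omega : n < 362880), eq_false (by omega : ¬(362880 = n)), eq_false (by omega : ¬(n = 362880)), eq_false (by omega : ¬(3628800 < n)), eq_true (by omega : n < 3628800), eq_false (by omega : ¬(3628800 = n)), eq_false (by omega : ¬(n = 3628800))]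
  by_cases e6 : n = 5040
  · subst e6; decide
  by_cases g6 : n < 40320
  · unfold solution solution_alt
    rw [hEnum]
    simp [solutionLoopA, bisectLoop, pvFacTable, apply_ite (fun o : Option Int => o.getD 0)]
    norm_num [eq_true (by omega : 1 < n), eq_false (by omega : ¬(n < 1)), eq_false (by omega : ¬(1 = n)), eq_false (by omega : ¬(n = 1)), eq_false (by omega : ¬(n ≤ 1)), eq_true (by omega : 1 ≤ n), eq_true (by omega : 2 < n), eq_false (by omega : ¬(n < 2)), eq_false (by omega : ¬(2 = n)), eq_false (by omega : ¬(n = 2)), eq_false (by omega : ¬(n ≤ 2)), eq_true (by omega : 2 ≤ n), eq_true (by omega : 6 < n), eq_false (by omega : ¬(n < 6)), eq_false (by omega : ¬(6 = n)), eq_false (by omega : ¬(n = 6)), eq_false (by omega : ¬(n ≤ 6)), eq_true (by omega : 6 ≤ n), eq_true (by omega : 24 < n), eq_false (by omega : ¬(n < 24)), eq_false (by omega : ¬(24 = n)), eq_false (by omega : ¬(n = 24)), eq_false (by omega : ¬(n ≤ 24)), eq_true (by omega : 24 ≤ n), eq_true (by omega : 120 < n), eq_false (by omega : ¬(n < 120)),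 eq_false (by omega : ¬(120 = n)), eq_false (by omega : ¬(n = 120)), eq_false (by omega : ¬(n ≤ 120)), eq_true (by omega : 120 ≤ n), eq_true (by omega : 720 < n), eq_false (by omega : ¬(n < 720)), eq_false (by omega : ¬(720 = n)), eq_false (by omega : ¬(n = 720)), eq_false (by omega : ¬(n ≤ 720)), eq_true (by omega : 720 ≤ n), eq_true (by omega : 5040 < n), eq_false (by omega : ¬(n < 5040)), eq_false (by omega : ¬(5040 = n)), eq_false (by omega : ¬(n = 5040)), eq_false (by omega : ¬(n ≤ 5040)), eq_true (by omega : 5040 ≤ n), eq_false (by omega : ¬(40320 < n)), eq_true (by omega : n < 40320), eq_false (by omega : ¬(40320 = n)), eq_false (by omega : ¬(n = 40320)), eq_false (by omega : ¬(362880 < n)), eq_true (by omega : n < 362880), eq_false (by omega : ¬(362880 = n)), eq_false (by omega : ¬(n = 362880)), eq_false (by omega : ¬(3628800 < n)), eq_true (by omega : n < 3628800), eq_false (by omega : ¬(3628800 = n)), eq_false (by omega : ¬(n = 3628800))]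
  by_cases e7 : n = 40320
  · subst e7; decide
  by_cases g7 : n < 362880
  · unfold solution solution_alt
    rw [hEnum]
    simp [solutionLoopA, bisectLoop, pvFacTable, apply_ite (fun o : Option Int => o.getD 0)]
    norm_num [eq_true (by omega : 1 < n), eq_false (by omega : ¬(n < 1)), eq_false (by omega : ¬(1 = n)), eq_false (by omega : ¬(n = 1)), eq_false (by omega : ¬(n ≤ 1)), eq_true (by omega : 1 ≤ n), eq_true (by omega : 2 < n), eq_false (by omega : ¬(n < 2)), eq_false (by omega : ¬(2 = n)), eq_false (by omega : ¬(n = 2)), eq_false (by omega : ¬(n ≤ 2)), eq_true (by omega : 2 ≤ n), eq_true (by omega : 6 < n), eq_false (by omega : ¬(n < 6)), eq_false (by omega : ¬(6 = n)), eq_false (by omega : ¬(n = 6)), eq_false (by omega : ¬(n ≤ 6)), eq_true (by omega : 6 ≤ n), eq_true (by omega : 24 < n), eq_false (by omega : ¬(n < 24)), eq_false (by omega : ¬(24 = n)), eq_false (by omega : ¬(n = 24)), eq_false (by omega : ¬(n ≤ 24)), eq_true (by omega : 24 ≤ n), eq_true (by omega : 120 < n), eq_false (by omega : ¬(n < 120)),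 eq_false (by omega : ¬(120 = n)), eq_false (by omega : ¬(n = 120)), eq_false (by omega : ¬(n ≤ 120)), eq_true (by omega : 120 ≤ n), eq_true (by omega : 720 < n), eq_false (by omega : ¬(n < 720)), eq_false (by omega : ¬(720 = n)), eq_false (by omega : ¬(n = 720)), eq_false (by omega : ¬(n ≤ 720)), eq_true (by omega : 720 ≤ n), eq_true (by omega : 5040 < n), eq_false (by omega : ¬(n < 5040)), eq_false (by omega : ¬(5040 = n)), eq_false (by omega : ¬(n = 5040)), eq_false (by omega : ¬(n ≤ 5040)), eq_true (by omega : 5040 ≤ n), eq_true (by omega : 40320 < n), eq_false (by omega : ¬(n < 40320)), eq_false (by omega : ¬(40320 = n)), eq_false (by omega : ¬(n = 40320)), eq_false (by omega : ¬(n ≤ 40320)), eq_true (by omega : 40320 ≤ n), eq_false (by omega : ¬(362880 < n)), eq_true (by omega : n < 362880), eq_false (by omega : ¬(362880 = n)), eq_false (by omega : ¬(n = 362880)), eq_false (by omega : ¬(3628800 < n)), eq_true (by omega : n < 3628800), eq_false (by omega : ¬(3628800 = n)), eq_false (by omega : ¬(n = 3628800))]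
  by_cases e8 : n = 362880
  · subst e8; decide
  by_cases g8 : n < 3628800
  · unfold solution solution_alt
    rw [hEnum]
    simp [solutionLoopA, bisectLoop, pvFacTable, apply_ite (fun o : Option Int => o.getD 0)]
    norm_num [eq_true (by omega : 1 < n), eq_false (by omega : ¬(n < 1)), eq_false (by omega : ¬(1 = n)), eq_false (by omega : ¬(n = 1)), eq_false (by omega : ¬(n ≤ 1)), eq_true (by omega : 1 ≤ n), eq_true (by omega : 2 < n), eq_false (by omega : ¬(n < 2)), eq_false (by omega : ¬(2 = n)), eq_false (by omega : ¬(n = 2)), eq_false (by omega : ¬(n ≤ 2)), eq_true (by omega : 2 ≤ n), eq_true (by omega : 6 < n), eq_false (by omega : ¬(n < 6)), eq_false (by omega : ¬(6 = n)), eq_false (by omega : ¬(n = 6)), eq_false (by omega : ¬(n ≤ 6)), eq_true (by omega : 6 ≤ n), eq_true (by omega : 24 < n), eq_false (by omega : ¬(n < 24)), eq_false (by omega : ¬(24 = n)), eq_false (by omega : ¬(n = 24)), eq_false (by omega : ¬(n ≤ 24)), eq_true (by omega : 24 ≤ n), eq_true (by omega : 120 < n), eq_false (by omega : ¬(n < 120)),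 eq_false (by omega : ¬(120 = n)), eq_false (by omega : ¬(n = 120)), eq_false (by omega : ¬(n ≤ 120)), eq_true (by omega : 120 ≤ n), eq_true (by omega : 720 < n), eq_false (by omega : ¬(n < 720)), eq_false (by omega : ¬(720 = n)), eq_false (by omega : ¬(n = 720)), eq_false (by omega : ¬(n ≤ 720)), eq_true (by omega : 720 ≤ n), eq_true (by omega : 5040 < n), eq_false (by omega : ¬(n < 5040)), eq_false (by omega : ¬(5040 = n)), eq_false (by omega : ¬(n = 5040)), eq_false (by omega : ¬(n ≤ 5040)), eq_true (by omega : 5040 ≤ n), eq_true (by omega : 40320 < n), eq_false (by omega : ¬(n < 40320)), eq_false (by omega : ¬(40320 = n)), eq_false (by omega : ¬(n = 40320)), eq_false (by omega : ¬(n ≤ 40320)), eq_true (by omega : 40320 ≤ n), eq_true (by omega : 362880 < n), eq_false (by omega : ¬(n < 362880)), eq_false (by omega : ¬(362880 = n)), eq_false (by omega : ¬(n = 362880)), eq_false (by omega : ¬(n ≤ 362880)), eq_true (by omega : 362880 ≤ n), eq_false (by omega : ¬(3628800 < n)), eq_true (by omega : n < 3628800), eq_false (by omega : ¬(3628800 =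 n)), eq_false (by omega : ¬(n = 3628800))]
  by_cases e9 : n = 3628800
  · subst e9; decide
  omega  -- n ≤ 3628800, n ≥ all smaller cases ⇒ contradiction
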